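-- pv_equiv track=rewrite | github.com/schatty/bioinformatics | courses/2_genome_sequencing/week_1.py | graph_overlap
-- ===== SOURCE A (Python) =====
-- def graph_overlap(kmers):
--     """ Build adjecency list from list of kmers """
--
--     def get_postfixes(kmer, kmers_list):
--         postfixes = []
--         for km in kmers_list:
--             if kmer[1:] == km[:-1]:
--                 postfixes.append(km)
--         return postfixes
--
--     adj_list = dict()
--     for i, kmer in enumerate(kmers):
--         postfixes = get_postfixes(kmer, kmers[:i] + kmers[i+1:])
--         if len(postfixes):
--             adj_list[kmer] = postfixes
--     return adj_list
-- ===== SOURCE B (Python) =====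
-- def graph_overlap(kmers):
--     """ Build adjecency list from list of kmers """
--     by_prefix = {}
--     for j, km in enumerate(kmers):
--         by_prefix.setdefault(km[:-1], []).append((j, km))
--     adj_list = {}
--     for i, kmer in enumerate(kmers):
--         matches = [km for j, km in by_prefix.get(kmer[1:], []) if j != i]
--         if matches:
--             adj_list[kmer] = matches
--     return adj_list
-- ===== Notes on version B (the rewrite author's own statement) =====
-- stated objective: faster
-- what changed: Replaces the O(n^2) per-kmer scan over all other kmers by a dict indexing kmers by their (k-1)-prefix built in one pass, so each kmer's neighbours are a single hash lookup filtered by index.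
import Mathlib
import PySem

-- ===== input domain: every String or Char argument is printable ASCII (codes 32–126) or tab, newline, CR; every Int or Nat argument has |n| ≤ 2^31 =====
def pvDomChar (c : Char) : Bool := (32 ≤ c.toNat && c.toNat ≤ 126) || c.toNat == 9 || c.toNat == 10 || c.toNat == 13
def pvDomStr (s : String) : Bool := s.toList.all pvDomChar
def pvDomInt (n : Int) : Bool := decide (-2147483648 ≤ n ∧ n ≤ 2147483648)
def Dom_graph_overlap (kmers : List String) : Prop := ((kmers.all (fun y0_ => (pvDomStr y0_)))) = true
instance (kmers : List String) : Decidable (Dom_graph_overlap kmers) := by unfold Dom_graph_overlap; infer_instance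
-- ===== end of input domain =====

-- B replaces A's quadratic all-pairs scan by a one-pass dict indexing kmers by (k-1)-prefix (objective: faster; asymptotic).

-- ===== PORT A =====
-- A's inner helper get_postfixes: scan kmers_list, append km when kmer[1:] == km[:-1]
def getPostfixes (kmer : String) (kmersList : List String) : List String :=
  kmersList.foldl (fun postfixes km =>
    if PySem.Str.slice kmer (some 1) none == PySem.Str.slice km none (some (-1))
    then postfixes ++ [km] else postfixes) []

def graph_overlap (kmers : List String) : List (String × List String) :=
  ((PySem.List.enumerate kmers).foldl (fun adj p =>
      let postfixes := getPostfixes p.2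
        (PySem.List.slice kmers none (some p.1) ++ PySem.List.slice kmers (some (p.1 + 1)) none)
      if postfixes.length ≠ 0 then adj.insert p.2 postfixes else adj)
    (PySem.Dict.empty : PySem.Dict String (List String))).items

-- ===== PORT B =====
def graph_overlap_alt (kmers : List String) : List (String × List String) :=
  let byPrefix : PySem.Dict String (List (Int × String)) :=
    (PySem.List.enumerate kmers).foldl (fun d p =>
      d.modify (PySem.Str.slice p.2 none (some (-1))) [] (fun l => l ++ [p])) PySem.Dict.empty
  ((PySem.List.enumerate kmers).foldl (fun adj p =>
      let ms := ((byPrefix.getD (PySem.Str.slice p.2 (some 1) none) []).filter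
          (fun q => q.1 != p.1)).map (·.2)
      if ms ≠ [] then adj.insert p.2 ms else adj)
    (PySem.Dict.empty : PySem.Dict String (List String))).items

-- ===== PRECONDITION & SPEC =====
def Spec_graph_overlap (kmers : List String) (out : List (String × List String)) : Prop := out = graph_overlap_alt kmers
instance (kmers : List String) (out : List (String × List String)) : Decidable (Spec_graph_overlap kmers out) := by unfold Spec_graph_overlap; infer_instance

-- ===== CLAIM (what is proved, stated in full; the proofs are below) =====
def Claim_equal_graph_overlap : Prop := ∀ (kmers : List String), Dom_graph_overlap kmers → Spec_graph_overlap kmers (graph_overlap kmers)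

-- ===== LEMMAS AND PROOFS =====

-- all indices in 'enumerate xs s' are ≥ s, so filtering out an index below s keeps everything
lemma filter_enum_of_lt {α : Type} (xs : List α) (s t : Int) (h : t < s) :
    (PySem.List.enumerate xs s).filter (fun p => p.1 != t) = PySem.List.enumerate xs s := by
  apply List.filter_eq_self.mpr
  intro p hp
  obtain ⟨k, hk, rfl⟩ := (PySem.List.mem_enumerate_iff xs s p).mp hp
  simp only [bne_iff_ne, ne_eq]
  omega

-- dropping index s+i from 'enumerate xs s' is xs with its i-th element removed
lemma enum_filter_ne {α : Type} (xs : List α) (s : Int) (i : Nat) :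
    ((PySem.List.enumerate xs s).filter (fun p => p.1 != (s + i))).map (·.2)
      = xs.take i ++ xs.drop (i + 1) := by
  induction xs generalizing s i with
  | nil => simp [PySem.List.enumerate]
  | cons x xs ih =>
    cases i with
    | zero =>
      rw [PySem.List.enumerate_cons]
      have h0 : ((s, x).1 != (s + (0 : Nat))) = false := by simp
      simp only [List.filter_cons, Nat.cast_zero, add_zero]
      rw [filter_enum_of_lt xs (s + 1) s (by omega)]
      simp [PySem.List.map_snd_enumerate]
    | succ i =>
      rw [PySem.List.enumerate_cons]
      have h0 : ((s, x).1 != (s + ((i + 1 : Nat)))) = true := by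
        simp only [bne_iff_ne, ne_eq]; push_cast; omega
      rw [List.filter_cons]
      simp only [h0, if_true, List.map_cons]
      have := ih (s + 1) i
      rw [show (s + 1 + (i : Int)) = s + ((i + 1 : Nat) : Int) by push_cast; ring] at this
      rw [this]
      simp

-- the prefix index built by B, looked up at key c, is exactly the enumerated kmers whose prefix is c
lemma byPrefix_getD (kmers : List String) (c : String) :
    ((PySem.List.enumerate kmers).foldl (fun d p =>
        d.modify (PySem.Str.slice p.2 none (some (-1))) [] (fun l => l ++ [p]))
      (PySem.Dict.empty : PySem.Dict String (List (Int × String)))).getD c []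
    = (PySem.List.enumerate kmers).filter
        (fun p => PySem.Str.slice p.2 none (some (-1)) == c) := by
  have h := PySem.Dict.getD_foldl_modify_append
    ((PySem.List.enumerate kmers).map (fun p => (PySem.Str.slice p.2 none (some (-1)), p)))
    (PySem.Dict.empty : PySem.Dict String (List (Int × String))) c
  rw [List.foldl_map] at h
  simpa [List.filter_map, List.map_map, Function.comp_def] using h

-- pointwise: A's postfix scan for index k equals B's indexed lookup filtered by index
lemma post_eq (kmers : List String) (k : Nat) (kmer : String) :
    getPostfixes kmer
        (PySem.List.slice kmers none (some (k : Int))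
          ++ PySem.List.slice kmers (some ((k : Int) + 1)) none)
    = ((((PySem.List.enumerate kmers).foldl (fun d p =>
            d.modify (PySem.Str.slice p.2 none (some (-1))) [] (fun l => l ++ [p]))
          (PySem.Dict.empty : PySem.Dict String (List (Int × String)))).getD
            (PySem.Str.slice kmer (some 1) none) []).filter
        (fun q => q.1 != (k : Int))).map (·.2) := by
  rw [byPrefix_getD, List.filter_filter]
  rw [getPostfixes, PySem.List.foldl_append_if_eq_filter, List.nil_append]
  rw [PySem.List.slice_to_natCast]
  rw [show ((k : Int) + 1) = (((k + 1 : Nat)) : Int) by push_cast; ring,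
      PySem.List.slice_from_natCast]
  rw [← enum_filter_ne kmers 0 k]
  rw [List.filter_map, List.filter_filter]
  apply congrArg
  apply List.filter_congr
  intro p _
  simp [Bool.and_comm, Function.comp, Bool.beq_comm]

-- ===== VERDICT (by name: the statement is the Claim_ definition above) =====
theorem graph_overlap_spec : Claim_equal_graph_overlap := by
  intro kmers _
  unfold Spec_graph_overlap graph_overlap graph_overlap_alt
  apply congrArg PySem.Dict.items
  apply PySem.List.foldl_congr_mem
  intro adj p hp
  obtain ⟨k, hk, rfl⟩ := (PySem.List.mem_enumerate_iff kmers 0 p).mp hp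
  simp only [zero_add]
  rw [post_eq kmers k kmers[k]]
  rcases hL : (List.map (fun x => x.2)
      (List.filter (fun q => q.1 != (k : Int))
        ((List.foldl (fun d p => d.modify (PySem.Str.slice p.2 none (some (-1))) [] fun l => l ++ [p])
              PySem.Dict.empty (PySem.List.enumerate kmers)).getD
          (PySem.Str.slice kmers[k] (some 1)) []))) with _ | ⟨a, L⟩ <;>
    simp [hL]
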